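-- pv_equiv track=rewrite | github.com/boostcamp-5th-NLP05/programmers-study | yunjin/5_징검다리 건너기.py | solution
-- ===== SOURCE A (Python) =====
-- def solution(stones, k):
--     answer = int(1e9)
--     r = []
--
--     if k >= len(stones):
--         return max(stones)
--
--     for i in range(0, len(stones) - k + 1):
--         ma = max(stones[i:i + k])
--         mi = min(stones[i:i + k])
--         x = ma - mi
--
--         # 갭이 k 보다 작으면, 건너다가 더 이상 못건너게 되는 상황이 발생함.
--         if x <= k:
--             # 그 구간의 최댓값을 구하면 그것은 최소 건널 수 있다는 것이 됨.
--             # 그 것들 중의 최소값이 전체 건널 수 있는 것 중 최소 친구 수가 됨.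
--             answer = min(answer, ma)
--
--     return answer
-- ===== SOURCE B (Python) =====
-- def solution(stones, k):
--     n = len(stones)
--     if k >= n:
--         return max(stones)
--     # sparse-table doubling: after the loop, pmax[i]/pmin[i] hold the
--     # max/min of stones[i:i+s] where s is the largest power of two <= k
--     pmax = stones[:]
--     pmin = stones[:]
--     s = 1
--     while 2 * s <= k:
--         pmax = [max(a, b) for a, b in zip(pmax, pmax[s:])]
--         pmin = [min(a, b) for a, b in zip(pmin, pmin[s:])]
--         s *= 2
--     t = k - s  # two length-s blocks at i and i+t cover the window [i, i+k)
--     answer = 10 ** 9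
--     for i in range(n - k + 1):
--         ma = max(pmax[i], pmax[i + t])
--         mi = min(pmin[i], pmin[i + t])
--         if ma - mi <= k:
--             answer = min(answer, ma)
--     return answer
-- ===== Notes on version B (the rewrite author's own statement) =====
-- stated objective: faster
-- what changed: B replaces A's per-window rescans (max/min of each length-k slice) with a sparse-table doubling pass: log2(k) zip-max/zip-min passes build max/min of every length-s block for the largest power of two s <= k, and each window's max/min is then the max/min of two overlapping length-s blocks, read in O(1).
import Mathlib
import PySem

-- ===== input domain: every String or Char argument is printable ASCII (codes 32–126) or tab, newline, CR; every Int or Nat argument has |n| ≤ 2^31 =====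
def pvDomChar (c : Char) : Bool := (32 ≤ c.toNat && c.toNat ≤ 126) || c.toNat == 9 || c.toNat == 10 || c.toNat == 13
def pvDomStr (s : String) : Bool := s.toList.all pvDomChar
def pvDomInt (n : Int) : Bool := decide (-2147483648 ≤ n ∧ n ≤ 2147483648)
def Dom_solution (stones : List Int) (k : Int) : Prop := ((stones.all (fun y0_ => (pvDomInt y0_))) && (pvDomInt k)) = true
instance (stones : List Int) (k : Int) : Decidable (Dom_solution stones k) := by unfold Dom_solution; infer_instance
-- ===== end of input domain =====

-- B replaces A's per-window max/min rescans by a sparse-table doubling pass (two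
-- overlapping power-of-two blocks per window); equal on Pre_ (nonempty stones, k ≥ 1).

-- ===== PORT A =====
-- literal port of A; max([])/min([]) raise in Python (excluded by Pre_), ported as .getD 0
def solution (stones : List Int) (k : Int) : Int :=
  let answer : Int := 1000000000
  if k ≥ PySem.List.len stones then
    (PySem.List.max? stones (fun y => y)).getD 0
  else
    (PySem.List.pyRange 0 (PySem.List.len stones - k + 1)).foldl
      (fun answer i =>
        let ma := (PySem.List.max? (PySem.List.slice stones (some i) (some (i + k))) (fun y => y)).getD 0
        let mi := (PySem.List.min? (PySem.List.slice stones (some i) (some (i + k))) (fun y => y)).getD 0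
        let x := ma - mi
        if x ≤ k then min answer ma else answer)
      answer

-- ===== PORT B =====
-- the 'while 2*s <= k' doubling loop of Source B; the fuel argument only makes the
-- recursion structural (k.toNat steps are always enough, since s starts at 1 and doubles)
def solutionAltLoop : Nat → List Int → List Int → Int → Int → List Int × List Int × Int
  | 0, pmax, pmin, s, _ => (pmax, pmin, s)
  | fuel + 1, pmax, pmin, s, k =>
    if 2 * s ≤ k then
      solutionAltLoop fuel (List.zipWith max pmax (PySem.List.slice pmax (some s)))
                           (List.zipWith min pmin (PySem.List.slice pmin (some s)))
                           (2 * s) k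
    else (pmax, pmin, s)

def solution_alt (stones : List Int) (k : Int) : Int :=
  let n := PySem.List.len stones
  if k ≥ n then
    (PySem.List.max? stones (fun y => y)).getD 0
  else
    let r := solutionAltLoop k.toNat stones stones 1 k
    let t := k - r.2.2
    (PySem.List.pyRange 0 (n - k + 1)).foldl
      (fun answer i =>
        let ma := max (PySem.List.pyGetD r.1 i 0) (PySem.List.pyGetD r.1 (i + t) 0)
        let mi := min (PySem.List.pyGetD r.2.1 i 0) (PySem.List.pyGetD r.2.1 (i + t) 0)
        if ma - mi ≤ k then min answer ma else answer)
      1000000000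

-- ===== PRECONDITION & SPEC =====
-- Pre_ excludes exactly the inputs where A raises: stones = [] (max([]) → ValueError)
-- and k ≤ 0 (every window slice stones[i:i+k] is empty → max([]) → ValueError).
def Pre_solution (stones : List Int) (k : Int) : Prop := stones ≠ [] ∧ 1 ≤ k
instance (stones : List Int) (k : Int) : Decidable (Pre_solution stones k) := by unfold Pre_solution; infer_instance

def pvWitness_solution : List Int × Int := ([3, 1, 2], 1)

def Spec_solution (stones : List Int) (k : Int) (out : Int) : Prop := out = solution_alt stones k
instance (stones : List Int) (k : Int) (out : Int) : Decidable (Spec_solution stones k out) := by unfold Spec_solution; infer_instance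

-- ===== CLAIM (what is proved, stated in full; the proofs are below) =====
def Claim_equal_solution : Prop := ∀ (stones : List Int) (k : Int), Dom_solution stones k → Pre_solution stones k → Spec_solution stones k (solution stones k)

-- ===== LEMMAS AND PROOFS =====

-- fold of a binary operation over a nonempty list, Python's max(l)/min(l)
def listF (op : Int → Int → Int) : List Int → Int
  | [] => 0
  | x :: t => t.foldl op x

-- the window stones[i : i+s]
def win (xs : List Int) (i s : Nat) : List Int := (xs.drop i).take s

lemma maxD_eq (l : List Int) : (PySem.List.max? l (fun y => y)).getD 0 = listF max l := by
  cases l with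
  | nil => rfl
  | cons x t => rw [PySem.List.max?_id_cons]; rfl

lemma minD_eq (l : List Int) : (PySem.List.min? l (fun y => y)).getD 0 = listF min l := by
  cases l with
  | nil => rfl
  | cons x t => rw [PySem.List.min?_id_cons]; rfl

lemma foldl_op_shift (op : Int → Int → Int) (hassoc : ∀ a b c, op (op a b) c = op a (op b c))
    (u : List Int) : ∀ c y : Int, u.foldl op (op c y) = op c (u.foldl op y) := by
  induction u with
  | nil => intro c y; rfl
  | cons z u ih => intro c y; simp only [List.foldl_cons]; rw [hassoc, ih]

lemma listF_append (op : Int → Int → Int) (hassoc : ∀ a b c, op (op a b) c = op a (op b c))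
    (a b : List Int) (ha : a ≠ []) (hb : b ≠ []) :
    listF op (a ++ b) = op (listF op a) (listF op b) := by
  cases a with
  | nil => exact absurd rfl ha
  | cons x t =>
    cases b with
    | nil => exact absurd rfl hb
    | cons y u =>
      simp only [listF, List.cons_append, List.foldl_append, List.foldl_cons]
      exact foldl_op_shift op hassoc u _ y

lemma win_ne (xs : List Int) (i s : Nat) (h1 : i < xs.length) (h2 : 0 < s) : win xs i s ≠ [] := by
  apply List.ne_nil_of_length_pos
  simp only [win, List.length_take, List.length_drop]
  omega

lemma win_split (xs : List Int) (i a b : Nat) : win xs i (a + b) = win xs i a ++ win xs (i + a) b := by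
  simp only [win, List.take_add, List.drop_drop]

-- max/min over a length-(s+t) window is op of the two overlapping length-s blocks at i and i+t
lemma listF_two_blocks (op : Int → Int → Int) (hassoc : ∀ a b c, op (op a b) c = op a (op b c))
    (hidem : ∀ a, op a a = a) (xs : List Int) (i s t : Nat) (hs : 0 < s) (hts : t < s)
    (hlen : i + s + t ≤ xs.length) :
    listF op (win xs i (s + t)) = op (listF op (win xs i s)) (listF op (win xs (i + t) s)) := by
  rcases Nat.eq_zero_or_pos t with ht | ht
  · subst ht
    simp [hidem]
  · have hA : win xs i t ≠ [] := win_ne _ _ _ (by omega) ht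
    have hB : win xs (i + t) (s - t) ≠ [] := win_ne _ _ _ (by omega) (by omega)
    have hC : win xs (i + s) t ≠ [] := win_ne _ _ _ (by omega) ht
    have e1 : win xs i (s + t) = win xs i t ++ win xs (i + t) s := by
      rw [Nat.add_comm s t]; exact win_split xs i t s
    have e2 : win xs i s = win xs i t ++ win xs (i + t) (s - t) := by
      have h : t + (s - t) = s := by omega
      conv_lhs => rw [← h]
      exact win_split xs i t (s - t)
    have e3 : win xs (i + t) s = win xs (i + t) (s - t) ++ win xs (i + s) t := by
      have h : (s - t) + t = s := by omega
      conv_lhs => rw [← h]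
      rw [win_split]
      congr 2
      omega
    rw [e1, e2, e3]
    rw [listF_append op hassoc _ _ hA
      (by intro hcon; rcases List.append_eq_nil_iff.mp hcon with ⟨h1, _⟩; exact hB h1)]
    rw [listF_append op hassoc _ _ hA hB, listF_append op hassoc _ _ hB hC]
    rw [hassoc, ← hassoc (listF op (win xs (i + t) (s - t))) (listF op (win xs (i + t) (s - t))),
      hidem]

-- loop invariant: pm has the op of every length-s window
def InvF (op : Int → Int → Int) (xs : List Int) (s : Int) (pm : List Int) : Prop :=
  1 ≤ s ∧ pm.length + s.toNat = xs.length + 1 ∧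
    ∀ i : Nat, i < pm.length → pm.getD i 0 = listF op (win xs i s.toNat)


lemma stepF (op : Int → Int → Int) (hassoc : ∀ a b c, op (op a b) c = op a (op b c))
    (xs : List Int) (s : Int) (pm : List Int) (h : InvF op xs s pm)
    (hlen : 2 * s.toNat ≤ xs.length + 1) :
    InvF op xs (2 * s) (List.zipWith op pm (PySem.List.slice pm (some s))) := by
  obtain ⟨hs1, hlen2, hinv⟩ := h
  rw [PySem.List.slice_from pm (by omega : (0:Int) ≤ s)]
  refine ⟨by omega, ?_, ?_⟩
  · simp only [List.length_zipWith, List.length_drop]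
    omega
  · intro i hi
    have hiz : i < (List.zipWith op pm (pm.drop s.toNat)).length := hi
    simp only [List.length_zipWith, List.length_drop] at hi
    have h1 : i < pm.length := by omega
    have h2 : s.toNat + i < pm.length := by omega
    rw [List.getD_eq_getElem _ _ hiz, List.getElem_zipWith, List.getElem_drop]
    rw [← List.getD_eq_getElem pm 0 h1, ← List.getD_eq_getElem pm 0 h2]
    rw [hinv i h1, hinv (s.toNat + i) h2]
    have hd : (2 * s).toNat = s.toNat + s.toNat := by omega
    rw [hd, win_split]
    rw [listF_append op hassoc _ _ (win_ne _ _ _ (by omega) (by omega)) (win_ne _ _ _ (by omega) (by omega))]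
    rw [Nat.add_comm s.toNat i]

lemma loop_inv (xs : List Int) (k : Int) (hk : k ≤ (xs.length : Int)) :
    ∀ (fuel : Nat) (s : Int) (pmax pmin : List Int), (k - s).toNat ≤ fuel →
    s ≤ k → InvF max xs s pmax → InvF min xs s pmin →
    InvF max xs (solutionAltLoop fuel pmax pmin s k).2.2 (solutionAltLoop fuel pmax pmin s k).1 ∧
    InvF min xs (solutionAltLoop fuel pmax pmin s k).2.2 (solutionAltLoop fuel pmax pmin s k).2.1 ∧
    (solutionAltLoop fuel pmax pmin s k).2.2 ≤ k ∧
    k < 2 * (solutionAltLoop fuel pmax pmin s k).2.2 := by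
  intro fuel
  induction fuel with
  | zero =>
    intro s pmax pmin hm hsk hM hmin
    have hs1 : 1 ≤ s := hM.1
    exact ⟨hM, hmin, hsk, by show k < 2 * s; omega⟩
  | succ f ih =>
    intro s pmax pmin hm hsk hM hmin
    have hs1 : 1 ≤ s := hM.1
    simp only [solutionAltLoop]
    by_cases hc : 2 * s ≤ k
    · rw [if_pos hc]
      have hlen : 2 * s.toNat ≤ xs.length + 1 := by omega
      exact ih (2 * s) _ _ (by omega) (by omega)
        (stepF max (fun a b c => max_assoc a b c) xs s pmax hM hlen)
        (stepF min (fun a b c => min_assoc a b c) xs s pmin hmin hlen)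
    · rw [if_neg hc]
      exact ⟨hM, hmin, hsk, by show k < 2 * s; omega⟩

lemma init_inv (op : Int → Int → Int) (xs : List Int) : InvF op xs 1 xs := by
  refine ⟨le_refl 1, by simp, ?_⟩
  intro i hi
  have hd : xs.drop i = xs[i] :: xs.drop (i + 1) := List.drop_eq_getElem_cons hi
  simp only [win, Int.toNat_one, hd, List.take_succ_cons, List.take_zero, listF,
    List.foldl_nil, List.getD_eq_getElem _ _ hi]

-- ===== VERDICT (by name: the statement is the Claim_ definition above) =====
theorem solution_spec : Claim_equal_solution := by
  intro stones k hdom hpre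
  obtain ⟨hne, hk1⟩ := hpre
  have hn0 : 0 < stones.length := List.length_pos_of_ne_nil hne
  unfold Spec_solution solution solution_alt
  simp only [PySem.List.len_eq]
  by_cases hk : k ≥ (stones.length : Int)
  · rw [if_pos hk, if_pos hk]
  · rw [if_neg hk, if_neg hk]
    push Not at hk
    obtain ⟨hM, hm, hsk, hks⟩ := loop_inv stones k (le_of_lt hk) k.toNat 1 stones stones
      (by omega) hk1 (init_inv max stones) (init_inv min stones)
    obtain ⟨hs1, hlenM, hinvM⟩ := hM
    obtain ⟨_, hlenm, hinvm⟩ := hm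
    apply PySem.List.foldl_congr_mem
    intro acc i hi
    rw [PySem.List.mem_pyRange_one] at hi
    obtain ⟨hi0, hi1⟩ := hi
    have e1 : PySem.List.slice stones (some i) (some (i + k)) = win stones i.toNat k.toNat := by
      rw [PySem.List.slice_toNat stones (by omega) (by omega)]
      unfold win
      congr 1
      omega
    have hcomb : ∀ (op : Int → Int → Int), (∀ a b c, op (op a b) c = op a (op b c)) →
        (∀ a, op a a = a) → ∀ pm : List Int,
        (1:Int) ≤ (solutionAltLoop k.toNat stones stones 1 k).2.2 →
        pm.length + (solutionAltLoop k.toNat stones stones 1 k).2.2.toNat = stones.length + 1 →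
        (∀ j : Nat, j < pm.length → pm.getD j 0 = listF op (win stones j (solutionAltLoop k.toNat stones stones 1 k).2.2.toNat)) →
        op (PySem.List.pyGetD pm i 0)
           (PySem.List.pyGetD pm (i + (k - (solutionAltLoop k.toNat stones stones 1 k).2.2)) 0) =
        listF op (win stones i.toNat k.toNat) := by
      intro op hassoc hidem pm hps hplen hpinv
      set s : Int := (solutionAltLoop k.toNat stones stones 1 k).2.2 with hsdef
      have hb1 : i.toNat < pm.length := by omega
      have hb2 : (i + (k - s)).toNat < pm.length := by omega
      have g1 : PySem.List.pyGetD pm i 0 = pm.getD i.toNat 0 := by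
        rw [PySem.List.pyGetD_eq_getElem pm 0 (by omega) (by exact_mod_cast by omega), List.getD_eq_getElem _ _ hb1]
      have g2 : PySem.List.pyGetD pm (i + (k - s)) 0 = pm.getD (i + (k - s)).toNat 0 := by
        rw [PySem.List.pyGetD_eq_getElem pm 0 (by omega) (by exact_mod_cast by omega), List.getD_eq_getElem _ _ hb2]
      rw [g1, g2, hpinv i.toNat hb1, hpinv (i + (k - s)).toNat hb2]
      have ht : (i + (k - s)).toNat = i.toNat + (k.toNat - s.toNat) := by omega
      rw [ht]
      have := listF_two_blocks op hassoc hidem stones i.toNat s.toNat (k.toNat - s.toNat)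
        (by omega) (by omega) (by omega)
      rw [show s.toNat + (k.toNat - s.toNat) = k.toNat by omega] at this
      exact this.symm
    have emax := hcomb max (fun a b c => max_assoc a b c) (fun a => max_self a) _ hs1 hlenM hinvM
    have emin := hcomb min (fun a b c => min_assoc a b c) (fun a => min_self a) _ hs1 hlenm hinvm
    simp only [e1, maxD_eq, minD_eq, emax, emin]
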